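-- pv_equiv track=rewrite | github.com/intisarGIT/simplechat | app.py | messages_to_pairs
-- ===== SOURCE A (Python) =====
-- def messages_to_pairs(messages: list) -> list:
--     """Convert flat messages list (dicts with role/content) to Chatbot pairs list.
--
--     Returns list of (user, assistant) tuples for gr.Chatbot.
--     """
--     pairs = []
--     i = 0
--     while i < len(messages):
--         if messages[i]["role"] == "user":
--             user = messages[i]["content"]
--             assistant = ""
--             if i + 1 < len(messages) and messages[i + 1]["role"] == "assistant":
--                 assistant = messages[i + 1]["content"]
--                 i += 2
--             else:
--                 i += 1
--             pairs.append((user, assistant))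
--         else:
--             i += 1
--     return pairs
-- ===== SOURCE B (Python) =====
-- def messages_to_pairs(messages: list) -> list:
--     """Convert flat messages list (dicts with role/content) to Chatbot pairs list.
--
--     Single forward for-loop: a 'user' message opens a new [user, ""] pair; an
--     'assistant' message directly after a 'user' fills the assistant slot of the
--     last pair. No manual index arithmetic.
--     """
--     pairs = []
--     prev_role = None
--     for m in messages:
--         role = m["role"]
--         if role == "user":
--             pairs.append([m["content"], ""])
--         elif role == "assistant" and prev_role == "user":
--             pairs[-1][1] = m["content"]
--         prev_role = role
--     return [tuple(p) for p in pairs]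
-- ===== Notes on version B (the rewrite author's own statement) =====
-- stated objective: simpler
-- what changed: Replaced A's manual while-loop index walk with lookahead and +1/+2 jumps by a single plain for-loop that appends a [user, ""] pair on a user message and back-fills the assistant slot of the last pair when an assistant message directly follows a user.
import Mathlib
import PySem

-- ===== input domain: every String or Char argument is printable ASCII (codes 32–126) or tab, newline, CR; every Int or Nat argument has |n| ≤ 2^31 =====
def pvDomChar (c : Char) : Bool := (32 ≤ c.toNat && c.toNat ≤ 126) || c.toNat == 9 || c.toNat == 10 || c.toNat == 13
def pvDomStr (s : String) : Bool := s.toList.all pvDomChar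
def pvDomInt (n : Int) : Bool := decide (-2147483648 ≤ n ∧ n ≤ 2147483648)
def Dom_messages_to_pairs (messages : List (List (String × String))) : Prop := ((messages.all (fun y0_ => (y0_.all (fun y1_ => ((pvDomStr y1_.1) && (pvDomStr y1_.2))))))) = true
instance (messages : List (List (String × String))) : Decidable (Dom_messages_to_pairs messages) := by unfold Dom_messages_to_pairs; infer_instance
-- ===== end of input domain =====

-- B replaces A's manual index walk (lookahead and +1/+2 jumps) by one plain for-loop that
-- back-fills the assistant slot of the last pair; objective: simpler.

-- dict lookup m[k] (first match; Pre_ excludes the KeyError case, so a default "" is never reached)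
def pvGetKey (m : List (String × String)) (k : String) : String :=
  (List.lookup k m).getD ""

-- ===== PORT A =====
-- the while-loop of A, on the same state (index i, accumulator pairs)
def mtpLoopA (messages : List (List (String × String))) (i : Nat)
    (pairs : List (String × String)) : List (String × String) :=
  if h : i < messages.length then
    if pvGetKey messages[i] "role" == "user" then
      if h2 : i + 1 < messages.length then
        if pvGetKey messages[i+1] "role" == "assistant" then
          mtpLoopA messages (i + 2)
            (pairs ++ [(pvGetKey messages[i] "content", pvGetKey messages[i+1] "content")])
        else
          mtpLoopA messages (i + 1) (pairs ++ [(pvGetKey messages[i] "content", "")])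
      else
        mtpLoopA messages (i + 1) (pairs ++ [(pvGetKey messages[i] "content", "")])
    else
      mtpLoopA messages (i + 1) pairs
  else pairs
termination_by messages.length - i

def messages_to_pairs (messages : List (List (String × String))) : List (String × String) :=
  mtpLoopA messages 0 []
-- ===== PORT B =====
-- one step of B's for-loop: state = (pairs so far, previous role)
def mtpStepB (s : List (String × String) × Option String) (m : List (String × String)) :
    List (String × String) × Option String :=
  let role := pvGetKey m "role"
  let pairs :=
    if role == "user" then
      s.1 ++ [(pvGetKey m "content", "")]
    else if role == "assistant" && s.2 == some "user" then
      -- pairs[-1][1] = m["content"]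
      s.1.dropLast ++ [((s.1.getLast?.getD ("", "")).1, pvGetKey m "content")]
    else s.1
  (pairs, some role)

def messages_to_pairs_alt (messages : List (List (String × String))) : List (String × String) :=
  (messages.foldl mtpStepB ([], none)).1

-- ===== PRECONDITION & SPEC =====
-- Pre_ = exactly the inputs on which Python A returns (no KeyError): every message has a
-- "role" key; every "user" message has "content"; every "assistant" message immediately
-- preceded by a "user" message has "content".  (B raises on exactly the same inputs.)
def Pre_messages_to_pairs (messages : List (List (String × String))) : Prop :=
  (∀ m ∈ messages, (List.lookup "role" m).isSome = true ∧
      (pvGetKey m "role" = "user" → (List.lookup "content" m).isSome = true)) ∧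
  (∀ p ∈ messages.zip messages.tail,
      pvGetKey p.1 "role" = "user" → pvGetKey p.2 "role" = "assistant" →
      (List.lookup "content" p.2).isSome = true)
instance (messages : List (List (String × String))) : Decidable (Pre_messages_to_pairs messages) := by
  unfold Pre_messages_to_pairs; infer_instance

def pvWitness_messages_to_pairs : (List (List (String × String))) :=
  [[("role", "user"), ("content", "hi")], [("role", "assistant"), ("content", "hello")]]

def Spec_messages_to_pairs (messages : List (List (String × String))) (out : List (String × String)) : Prop := out = messages_to_pairs_alt messages
instance (messages : List (List (String × String))) (out : List (String × String)) : Decidable (Spec_messages_to_pairs messages out) := by unfold Spec_messages_to_pairs; infer_instance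

-- ===== CLAIM (what is proved, stated in full; the proofs are below) =====
def Claim_equal_messages_to_pairs : Prop := ∀ (messages : List (List (String × String))), Dom_messages_to_pairs messages → Pre_messages_to_pairs messages → Spec_messages_to_pairs messages (messages_to_pairs messages)

-- ===== LEMMAS AND PROOFS =====

-- structural reference function: the user/assistant pairing, consuming one or two messages
def mtpRef : List (List (String × String)) → List (String × String)
  | [] => []
  | m :: rest =>
    if pvGetKey m "role" == "user" then
      match rest with
      | m2 :: rest2 =>
        if pvGetKey m2 "role" == "assistant" then
          (pvGetKey m "content", pvGetKey m2 "content") :: mtpRef rest2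
        else
          (pvGetKey m "content", "") :: mtpRef (m2 :: rest2)
      | [] => [(pvGetKey m "content", "")]
    else mtpRef rest
termination_by ms => ms.length
decreasing_by all_goals simp

theorem mtpLoopA_eq_ref (messages : List (List (String × String))) :
    ∀ n i pairs, messages.length - i ≤ n →
      mtpLoopA messages i pairs = pairs ++ mtpRef (messages.drop i) := by
  intro n
  induction n with
  | zero =>
    intro i pairs hn
    have h : ¬ i < messages.length := by omega
    rw [mtpLoopA]
    simp [h, List.drop_eq_nil_of_le (by omega : messages.length ≤ i), mtpRef]
  | succ n ih =>
    intro i pairs hn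
    rw [mtpLoopA]
    by_cases h : i < messages.length
    · have hdrop : messages.drop i = messages[i] :: messages.drop (i+1) :=
        (List.getElem_cons_drop h).symm
      rw [dif_pos h, hdrop]
      by_cases hu : (pvGetKey messages[i] "role" == "user") = true
      · rw [if_pos hu]
        by_cases h2 : i + 1 < messages.length
        · have hdrop2 : messages.drop (i+1) = messages[i+1] :: messages.drop (i+2) :=
            (List.getElem_cons_drop h2).symm
          rw [dif_pos h2]
          by_cases ha : (pvGetKey messages[i+1] "role" == "assistant") = true
          · rw [if_pos ha, ih (i+2) _ (by omega)]
            conv_rhs => rw [hdrop2, mtpRef.eq_def]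
            simp [hu, ha]
          · rw [if_neg ha, ih (i+1) _ (by omega)]
            conv_rhs => rw [hdrop2, mtpRef.eq_def]
            simp [hu, ha, ← hdrop2]
        · have hdrop2 : messages.drop (i+1) = [] :=
            List.drop_eq_nil_of_le (by omega)
          rw [dif_neg h2, ih (i+1) _ (by omega), hdrop2]
          conv_rhs => rw [mtpRef.eq_def]
          simp [hu, mtpRef]
      · rw [if_neg hu, ih (i+1) _ (by omega)]
        conv_rhs => rw [mtpRef.eq_def]
        simp [hu]
    · rw [dif_neg h]
      simp [List.drop_eq_nil_of_le (by omega : messages.length ≤ i), mtpRef]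

-- B's fold, characterised against the reference (two statements, for the two prev-role shapes)
theorem foldB_eq_ref :
    ∀ n (ms : List (List (String × String))), ms.length ≤ n →
    (∀ pairs prev, prev ≠ some "user" →
      (ms.foldl mtpStepB (pairs, prev)).1 = pairs ++ mtpRef ms) ∧
    (∀ pairs u,
      (ms.foldl mtpStepB (pairs ++ [(u, "")], some "user")).1 =
        pairs ++
          (match ms with
           | m2 :: rest2 =>
             if pvGetKey m2 "role" == "assistant" then
               (u, pvGetKey m2 "content") :: mtpRef rest2
             else (u, "") :: mtpRef ms
           | [] => [(u, "")])) := by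
  intro n
  induction n with
  | zero =>
    intro ms hn
    have : ms = [] := List.eq_nil_of_length_eq_zero (by omega)
    subst this
    constructor
    · intro pairs prev _; simp [mtpRef]
    · intro pairs u; simp
  | succ n ih =>
    intro ms hn
    constructor
    · intro pairs prev hprev
      match ms with
      | [] => simp [mtpRef]
      | m :: rest =>
        rw [List.foldl_cons]
        by_cases hu : (pvGetKey m "role" == "user") = true
        · have hstep : mtpStepB (pairs, prev) m =
              (pairs ++ [(pvGetKey m "content", "")], some (pvGetKey m "role")) := by
            simp [mtpStepB, hu]
          rw [hstep]
          have hu' : pvGetKey m "role" = "user" := by simpa using hu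
          rw [hu']
          rw [(ih rest (by simpa using Nat.lt_succ_iff.mp (by simpa using hn))).2 pairs
            (pvGetKey m "content")]
          conv_rhs => rw [mtpRef.eq_def]
          match rest with
          | [] => simp [hu]
          | m2 :: rest2 =>
            by_cases ha : (pvGetKey m2 "role" == "assistant") = true <;> simp [hu, ha]
        · have hstep : mtpStepB (pairs, prev) m = (pairs, some (pvGetKey m "role")) := by
            have hna : ¬ (pvGetKey m "role" == "assistant" && prev == some "user") = true := by
              intro hc
              exact hprev (by simpa using (Bool.and_elim_right hc))
            simp [mtpStepB, hu, hna]
          rw [hstep]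
          conv_rhs => rw [mtpRef.eq_def]
          rw [show (match m :: rest with
              | [] => ([] : List (String × String))
              | m :: rest =>
                if (pvGetKey m "role" == "user") = true then
                  match rest with
                  | m2 :: rest2 =>
                    if (pvGetKey m2 "role" == "assistant") = true then
                      (pvGetKey m "content", pvGetKey m2 "content") :: mtpRef rest2
                    else (pvGetKey m "content", "") :: mtpRef (m2 :: rest2)
                  | [] => [(pvGetKey m "content", "")]
                else mtpRef rest) = mtpRef rest from by simp [hu]]
          have hru : pvGetKey m "role" ≠ "user" := by
            intro hc; exact hu (by simp [hc])
          exact (ih rest (by simpa using Nat.lt_succ_iff.mp (by simpa using hn))).1 pairs _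
            (by simp [hru])
    · intro pairs u
      match ms with
      | [] => simp
      | m2 :: rest2 =>
        have hrest : rest2.length ≤ n := by simpa using Nat.lt_succ_iff.mp (by simpa using hn)
        rw [List.foldl_cons]
        by_cases ha : (pvGetKey m2 "role" == "assistant") = true
        · have hne : ¬ (pvGetKey m2 "role" == "user") = true := by
            have h1 : pvGetKey m2 "role" = "assistant" := by simpa using ha
            simp [h1]
          have hstep : mtpStepB (pairs ++ [(u, "")], some "user") m2 =
              (pairs ++ [(u, pvGetKey m2 "content")], some (pvGetKey m2 "role")) := by
            simp [mtpStepB, hne, ha]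
          rw [hstep]
          have ha' : pvGetKey m2 "role" = "assistant" := by simpa using ha
          rw [ha']
          rw [(ih rest2 hrest).1 (pairs ++ [(u, pvGetKey m2 "content")]) _ (by simp)]
          simp [ha]
        · by_cases hu2 : (pvGetKey m2 "role" == "user") = true
          · have hstep : mtpStepB (pairs ++ [(u, "")], some "user") m2 =
                ((pairs ++ [(u, "")]) ++ [(pvGetKey m2 "content", "")],
                  some (pvGetKey m2 "role")) := by
              simp [mtpStepB, hu2]
            rw [hstep]
            have hu2' : pvGetKey m2 "role" = "user" := by simpa using hu2
            rw [hu2']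
            rw [(ih rest2 hrest).2 (pairs ++ [(u, "")]) (pvGetKey m2 "content")]
            conv_rhs => rw [mtpRef.eq_def]
            match rest2 with
            | [] => simp [hu2, ha]
            | m3 :: rest3 =>
              by_cases ha3 : (pvGetKey m3 "role" == "assistant") = true <;> simp [hu2, ha, ha3]
          · have hstep : mtpStepB (pairs ++ [(u, "")], some "user") m2 =
                (pairs ++ [(u, "")], some (pvGetKey m2 "role")) := by
              simp [mtpStepB, hu2, ha]
            rw [hstep]
            have hru : pvGetKey m2 "role" ≠ "user" := by
              intro hc; exact hu2 (by simp [hc])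
            rw [(ih rest2 hrest).1 (pairs ++ [(u, "")]) _ (by simp [hru])]
            conv_rhs => rw [mtpRef.eq_def]
            simp [hu2, ha]

-- ===== VERDICT (by name: the statement is the Claim_ definition above) =====
theorem messages_to_pairs_spec : Claim_equal_messages_to_pairs := by
  intro messages _ _
  unfold Spec_messages_to_pairs messages_to_pairs messages_to_pairs_alt
  rw [mtpLoopA_eq_ref messages messages.length 0 [] (by omega)]
  rw [((foldB_eq_ref messages.length messages (le_refl _)).1 [] none (by simp))]
  simp
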